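-- pv_equiv track=rewrite | github.com/maltonn/550 | algo/half.py | HalfFullEnumeration
-- ===== SOURCE A (Python) =====
-- def HalfFullEnumeration(contents_half):
--     L=[]
--     for i in range(2**len(contents_half)):
--         tmp=tuple((menu,price) for j,(menu,price) in enumerate(contents_half) if (i>>j)&1)
--         menus=tuple(menu for menu,price in tmp)
--         total_price=sum(price for menu,price in tmp)
--         L.append((menus,total_price))
--
--     L.sort(key=lambda x:x[1])
--
--     menus_lst=[]
--     price_lst=[]
--     for menus,price in L:
--         menus_lst.append(menus)
--         price_lst.append(price)
--
--     return menus_lst,price_lst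
-- ===== SOURCE B (Python) =====
-- def HalfFullEnumeration(contents_half):
--     # Incremental subset doubling instead of bitmask enumeration; same order.
--     subsets = [((), 0)]
--     for menu, price in contents_half:
--         subsets = subsets + [(m + (menu,), t + price) for m, t in subsets]
--     subsets.sort(key=lambda x: x[1])
--     menus_lst = [m for m, _ in subsets]
--     price_lst = [t for _, t in subsets]
--     return menus_lst, price_lst
-- ===== Notes on version B (the rewrite author's own statement) =====
-- stated objective: alternative
-- what changed: Replaces the bitmask loop over range(2**n) with an inner per-index filter pass by incremental doubling of the subset list (subsets = subsets + extended copies), which yields the same subset order without any bit arithmetic; sort and unzip follow as before.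
import Mathlib
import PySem

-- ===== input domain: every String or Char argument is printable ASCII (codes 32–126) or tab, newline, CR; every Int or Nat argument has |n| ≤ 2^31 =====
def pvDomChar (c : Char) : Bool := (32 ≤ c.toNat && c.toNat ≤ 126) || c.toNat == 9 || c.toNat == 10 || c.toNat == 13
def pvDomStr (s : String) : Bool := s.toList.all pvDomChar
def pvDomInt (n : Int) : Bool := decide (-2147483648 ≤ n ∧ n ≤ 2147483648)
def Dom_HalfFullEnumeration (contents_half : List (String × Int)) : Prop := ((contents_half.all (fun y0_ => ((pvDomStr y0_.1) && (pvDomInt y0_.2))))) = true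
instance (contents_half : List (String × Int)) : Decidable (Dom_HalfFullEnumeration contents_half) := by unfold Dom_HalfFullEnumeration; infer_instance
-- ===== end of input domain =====

-- B replaces A's bitmask enumeration of subsets by incremental doubling of the subset
-- list (same order), an alternative decomposition of the same cost.

-- ===== PORT A =====
-- enumerate's indices are the nonnegative 0..len-1, so Nat-indexed zipIdx is exact here.
def HalfFullEnumeration (contents_half : List (String × Int)) : List (List String) × List Int :=
  let L := (List.range (2 ^ contents_half.length)).foldl
    (fun (L : List (List String × Int)) i =>
      let tmp := (contents_half.zipIdx.filter (fun p => (i >>> p.2) &&& 1 == 1)).map (fun p => p.1)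
      let menus := tmp.map (fun mp => mp.1)
      let total := (tmp.map (fun mp => mp.2)).foldl (· + ·) 0
      L ++ [(menus, total)]) []
  let Ls := PySem.List.sorted L (fun x => x.2) false
  Ls.foldl (fun acc mp => (acc.1 ++ [mp.1], acc.2 ++ [mp.2])) ([], [])

-- ===== PORT B =====
def HalfFullEnumeration_alt (contents_half : List (String × Int)) : List (List String) × List Int :=
  let subsets := contents_half.foldl
    (fun acc mp => acc ++ acc.map (fun s => (s.1 ++ [mp.1], s.2 + mp.2))) [([], (0 : Int))]
  let s := PySem.List.sorted subsets (fun x => x.2) false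
  (s.map (fun x => x.1), s.map (fun x => x.2))

-- ===== PRECONDITION & SPEC =====
def Spec_HalfFullEnumeration (contents_half : List (String × Int)) (out : List (List String) × List Int) : Prop := out = HalfFullEnumeration_alt contents_half
instance (contents_half : List (String × Int)) (out : List (List String) × List Int) : Decidable (Spec_HalfFullEnumeration contents_half out) := by unfold Spec_HalfFullEnumeration; infer_instance

-- ===== CLAIM (what is proved, stated in full; the proofs are below) =====
def Claim_equal_HalfFullEnumeration : Prop := ∀ (contents_half : List (String × Int)), Dom_HalfFullEnumeration contents_half → Spec_HalfFullEnumeration contents_half (HalfFullEnumeration contents_half)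

-- ===== LEMMAS AND PROOFS =====

-- A's subset-building function, written as a map over the range
def pvEnumA (chf : List (String × Int)) (i : Nat) : List String × Int :=
  let tmp := (chf.zipIdx.filter (fun p => (i >>> p.2) &&& 1 == 1)).map (fun p => p.1)
  (tmp.map (fun mp => mp.1), (tmp.map (fun mp => mp.2)).foldl (· + ·) 0)

-- B's subset-building fold
def pvEnumB (chf : List (String × Int)) : List (List String × Int) :=
  chf.foldl (fun acc mp => acc ++ acc.map (fun s => (s.1 ++ [mp.1], s.2 + mp.2))) [([], (0 : Int))]

theorem pv_foldl_append_map (f : Nat → List String × Int) :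
    ∀ (l : List Nat) (a : List (List String × Int)),
      l.foldl (fun acc i => acc ++ [f i]) a = a ++ l.map f := by
  intro l
  induction l with
  | nil => simp
  | cons x xs ih => intro a; simp [List.foldl_cons, ih]

theorem pv_foldl_unzip :
    ∀ (L : List (List String × Int)) (a : List (List String)) (b : List Int),
      L.foldl (fun acc mp => (acc.1 ++ [mp.1], acc.2 ++ [mp.2])) (a, b)
        = (a ++ L.map (fun x => x.1), b ++ L.map (fun x => x.2)) := by
  intro L
  induction L with
  | nil => simp
  | cons x xs ih => intro a b; simp [List.foldl_cons, ih]

theorem pv_bit_high {i n : Nat} (h : i < 2 ^ n) : ((2 ^ n + i) >>> n) &&& 1 == 1 := by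
  have : (2 ^ n + i) / 2 ^ n = 1 := by
    rw [Nat.add_div_left _ (Nat.two_pow_pos n), Nat.div_eq_of_lt h]
  simp [Nat.shiftRight_eq_div_pow, this]

theorem pv_bit_low {i n j : Nat} (hj : j < n) :
    (((2 ^ n + i) >>> j) &&& 1 == 1) = ((i >>> j) &&& 1 == 1) := by
  have hexp : j + (n - j - 1 + 1) = n := by omega
  have hsplit : 2 ^ n + i = 2 ^ j * (2 * 2 ^ (n - j - 1)) + i := by
    rw [← pow_succ', ← pow_add, hexp]
  have hdiv : (2 ^ n + i) / 2 ^ j = 2 * 2 ^ (n - j - 1) + i / 2 ^ j := by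
    rw [hsplit, Nat.mul_add_div (Nat.two_pow_pos j)]
  have hmod : (2 ^ n + i) / 2 ^ j % 2 = i / 2 ^ j % 2 := by omega
  simp [Nat.shiftRight_eq_div_pow, Nat.and_one_is_mod, hmod]

-- the heart: A's bitmask enumeration equals B's doubling fold
theorem pv_enum_eq (chf : List (String × Int)) :
    (List.range (2 ^ chf.length)).map (pvEnumA chf) = pvEnumB chf := by
  induction chf using List.reverseRecOn with
  | nil => simp [pvEnumA, pvEnumB]
  | append_singleton xs x ih =>
    have hlen : (xs ++ [x]).length = xs.length + 1 := by simp
    have hpow : 2 ^ (xs.length + 1) = 2 ^ xs.length + 2 ^ xs.length := by ring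
    have hrange : List.range (2 ^ (xs ++ [x]).length)
        = List.range (2 ^ xs.length) ++ (List.range (2 ^ xs.length)).map (2 ^ xs.length + ·) := by
      rw [hlen, hpow, List.range_add]
    have hzip : (xs ++ [x]).zipIdx = xs.zipIdx ++ [(x, xs.length)] := by
      simp [List.zipIdx_append]
    have hmem : ∀ p ∈ xs.zipIdx, p.2 < xs.length := by
      intro p hp
      exact List.snd_lt_of_mem_zipIdx hp
    -- low half: adding the new last item changes nothing for i < 2^n
    have hlow : ∀ i ∈ List.range (2 ^ xs.length), pvEnumA (xs ++ [x]) i = pvEnumA xs i := by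
      intro i hi
      have hi' : i < 2 ^ xs.length := List.mem_range.mp hi
      have hz : i >>> xs.length = 0 := by
        rw [Nat.shiftRight_eq_div_pow]; exact Nat.div_eq_of_lt hi'
      simp [pvEnumA, hzip, List.filter_append, hz]
    -- high half: the new last item is always included
    have hhigh : ∀ i ∈ List.range (2 ^ xs.length),
        pvEnumA (xs ++ [x]) (2 ^ xs.length + i)
          = ((pvEnumA xs i).1 ++ [x.1], (pvEnumA xs i).2 + x.2) := by
      intro i hi
      have hi' : i < 2 ^ xs.length := List.mem_range.mp hi
      have hfilt : xs.zipIdx.filter (fun p => ((2 ^ xs.length + i) >>> p.2) &&& 1 == 1)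
          = xs.zipIdx.filter (fun p => (i >>> p.2) &&& 1 == 1) := by
        apply List.filter_congr
        intro p hp
        exact pv_bit_low (hmem p hp)
      simp only [pvEnumA, hzip, List.filter_append, List.filter_cons, List.filter_nil,
        pv_bit_high hi', hfilt]
      simp [List.foldl_append]
    calc (List.range (2 ^ (xs ++ [x]).length)).map (pvEnumA (xs ++ [x]))
        = (List.range (2 ^ xs.length)).map (pvEnumA (xs ++ [x]))
          ++ ((List.range (2 ^ xs.length)).map (2 ^ xs.length + ·)).map (pvEnumA (xs ++ [x])) := by
          rw [hrange, List.map_append]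
      _ = (List.range (2 ^ xs.length)).map (pvEnumA xs)
          ++ ((List.range (2 ^ xs.length)).map (pvEnumA xs)).map
              (fun s => (s.1 ++ [x.1], s.2 + x.2)) := by
          rw [List.map_congr_left hlow, List.map_map, List.map_map]
          congr 1
          exact List.map_congr_left hhigh
      _ = pvEnumB (xs ++ [x]) := by
          rw [ih]
          simp [pvEnumB, List.foldl_append]

-- ===== VERDICT (by name: the statement is the Claim_ definition above) =====
theorem HalfFullEnumeration_spec : Claim_equal_HalfFullEnumeration := by
  intro chf _
  unfold Spec_HalfFullEnumeration HalfFullEnumeration HalfFullEnumeration_alt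
  rw [show (fun (L : List (List String × Int)) i =>
      let tmp := (chf.zipIdx.filter (fun p => (i >>> p.2) &&& 1 == 1)).map (fun p => p.1)
      let menus := tmp.map (fun mp => mp.1)
      let total := (tmp.map (fun mp => mp.2)).foldl (· + ·) 0
      L ++ [(menus, total)]) = (fun L i => L ++ [pvEnumA chf i]) from rfl]
  rw [pv_foldl_append_map (pvEnumA chf), List.nil_append, pv_enum_eq chf]
  rw [show chf.foldl (fun acc mp => acc ++ acc.map (fun s => (s.1 ++ [mp.1], s.2 + mp.2)))
      [([], (0 : Int))] = pvEnumB chf from rfl]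
  rw [pv_foldl_unzip]
  simp
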